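-- pv_equiv track=rewrite | github.com/shemtovi/song_analyzer_windsurf | src/inference/chords.py | _qualities_compatible
-- ===== SOURCE A (Python) =====
-- def _qualities_compatible(q1: str, q2: str) -> bool:
--     """
--     Check if two chord qualities are compatible (e.g., minor7 with minor).
--     """
--     compatible_groups = [
--         {"major", "major7", "dominant7", "6", "add9"},
--         {"minor", "minor7", "minor6"},
--         {"diminished", "diminished7", "half_diminished7"},
--         {"augmented", "augmented7"},
--     ]
--
--     for group in compatible_groups:
--         if q1 in group and q2 in group:
--             return True
--     return False
-- ===== SOURCE B (Python) =====
-- _GROUP = {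
--     "major": 0, "major7": 0, "dominant7": 0, "6": 0, "add9": 0,
--     "minor": 1, "minor7": 1, "minor6": 1,
--     "diminished": 2, "diminished7": 2, "half_diminished7": 2,
--     "augmented": 3, "augmented7": 3,
-- }
--
--
-- def _qualities_compatible(q1: str, q2: str) -> bool:
--     """
--     Check if two chord qualities are compatible (e.g., minor7 with minor).
--     """
--     g1 = _GROUP.get(q1)
--     return g1 is not None and g1 == _GROUP.get(q2)
-- ===== Notes on version B (the rewrite author's own statement) =====
-- stated objective: idiomatic
-- what changed: Replaces the loop over four membership sets with a precomputed quality-to-group-id dict; the body is two lookups and one comparison, with no loop over groups left.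
import Mathlib
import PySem

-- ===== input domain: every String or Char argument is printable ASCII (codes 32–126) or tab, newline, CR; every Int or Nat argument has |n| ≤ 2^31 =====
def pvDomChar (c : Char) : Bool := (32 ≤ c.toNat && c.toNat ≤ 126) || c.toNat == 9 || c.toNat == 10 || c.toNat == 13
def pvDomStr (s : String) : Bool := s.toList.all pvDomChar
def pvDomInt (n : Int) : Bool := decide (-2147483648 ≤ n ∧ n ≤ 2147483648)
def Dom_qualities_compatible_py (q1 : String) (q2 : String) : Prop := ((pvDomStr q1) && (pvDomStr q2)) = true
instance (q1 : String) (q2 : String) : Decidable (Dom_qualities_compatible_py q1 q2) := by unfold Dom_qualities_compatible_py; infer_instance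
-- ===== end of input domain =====

-- B replaces A's loop over four membership sets by a precomputed quality→group-id map
-- compared with two lookups (idiomatic; no loop over groups remains).


-- ===== PORT A =====
-- the four literal compatibility sets, as in A
def pvCompatibleGroups : List (PySem.Set String) :=
  [ PySem.Set.ofList ["major", "major7", "dominant7", "6", "add9"],
    PySem.Set.ofList ["minor", "minor7", "minor6"],
    PySem.Set.ofList ["diminished", "diminished7", "half_diminished7"],
    PySem.Set.ofList ["augmented", "augmented7"] ]

-- the 'for group in compatible_groups' loop with its early return
def pvGroupLoop (q1 q2 : String) : List (PySem.Set String) → Bool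
  | [] => false
  | g :: rest =>
      if PySem.Set.contains g q1 && PySem.Set.contains g q2 then true
      else pvGroupLoop q1 q2 rest

def qualities_compatible_py (q1 : String) (q2 : String) : Bool :=
  pvGroupLoop q1 q2 pvCompatibleGroups

-- ===== PORT B =====
-- B's module-level dict _GROUP, quality → group id
def pvGroupMap : PySem.Dict String Int :=
  PySem.Dict.mk  -- literal dict (all keys distinct)
    [ ("major", 0), ("major7", 0), ("dominant7", 0), ("6", 0), ("add9", 0),
      ("minor", 1), ("minor7", 1), ("minor6", 1),
      ("diminished", 2), ("diminished7", 2), ("half_diminished7", 2),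
      ("augmented", 3), ("augmented7", 3) ]

def qualities_compatible_py_alt (q1 : String) (q2 : String) : Bool :=
  let g1 := PySem.Dict.get? pvGroupMap q1
  g1.isSome && g1 == PySem.Dict.get? pvGroupMap q2

-- ===== PRECONDITION & SPEC =====
def Spec_qualities_compatible_py (q1 : String) (q2 : String) (out : Bool) : Prop := out = qualities_compatible_py_alt q1 q2
instance (q1 : String) (q2 : String) (out : Bool) : Decidable (Spec_qualities_compatible_py q1 q2 out) := by unfold Spec_qualities_compatible_py; infer_instance

-- ===== CLAIM (what is proved, stated in full; the proofs are below) =====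
def Claim_equal_qualities_compatible_py : Prop := ∀ (q1 : String) (q2 : String), Dom_qualities_compatible_py q1 q2 → Spec_qualities_compatible_py q1 q2 (qualities_compatible_py q1 q2)

-- ===== LEMMAS AND PROOFS =====

-- the 13 quality strings either program's tests can match
def pvQualities : List String :=
  ["major", "major7", "dominant7", "6", "add9", "minor", "minor7", "minor6",
   "diminished", "diminished7", "half_diminished7", "augmented", "augmented7"]

theorem pvUnknown_eq (q1 q2 : String) (h1 : q1 ∉ pvQualities) :
    qualities_compatible_py q1 q2 = qualities_compatible_py_alt q1 q2 := by
  simp only [pvQualities, List.mem_cons, List.not_mem_nil, or_false, not_or] at h1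
  obtain ⟨a1, a2, a3, a4, a5, a6, a7, a8, a9, a10, a11, a12, a13⟩ := h1
  simp [qualities_compatible_py, qualities_compatible_py_alt, pvGroupLoop,
    pvCompatibleGroups, pvGroupMap, PySem.Set.contains, PySem.Dict.get?, a1, a2, a3, a4, a5, a6, a7, a8, a9, a10, a11, a12, a13,
    Ne.symm a1, Ne.symm a2, Ne.symm a3, Ne.symm a4, Ne.symm a5, Ne.symm a6, Ne.symm a7,
    Ne.symm a8, Ne.symm a9, Ne.symm a10, Ne.symm a11, Ne.symm a12, Ne.symm a13]

theorem pvKnown_unknown_eq (q1 q2 : String) (h1 : q1 ∈ pvQualities) (h2 : q2 ∉ pvQualities) :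
    qualities_compatible_py q1 q2 = qualities_compatible_py_alt q1 q2 := by
  simp only [pvQualities, List.mem_cons, List.not_mem_nil, or_false, not_or] at h2
  obtain ⟨a1, a2, a3, a4, a5, a6, a7, a8, a9, a10, a11, a12, a13⟩ := h2
  fin_cases h1 <;>
    simp [qualities_compatible_py, qualities_compatible_py_alt, pvGroupLoop,
      pvCompatibleGroups, pvGroupMap, PySem.Set.contains, PySem.Dict.get?, a1, a2, a3, a4, a5, a6, a7, a8, a9, a10, a11, a12, a13,
    Ne.symm a1, Ne.symm a2, Ne.symm a3, Ne.symm a4, Ne.symm a5, Ne.symm a6, Ne.symm a7,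
    Ne.symm a8, Ne.symm a9, Ne.symm a10, Ne.symm a11, Ne.symm a12, Ne.symm a13]

-- ===== VERDICT (by name: the statement is the Claim_ definition above) =====
theorem qualities_compatible_py_spec : Claim_equal_qualities_compatible_py := by
  intro q1 q2 _
  show qualities_compatible_py q1 q2 = qualities_compatible_py_alt q1 q2
  by_cases h1 : q1 ∈ pvQualities
  · by_cases h2 : q2 ∈ pvQualities
    · fin_cases h1 <;> fin_cases h2 <;> decide
    · exact pvKnown_unknown_eq q1 q2 h1 h2
  · exact pvUnknown_eq q1 q2 h1
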